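-- pv_equiv track=rewrite | github.com/jclements3/trefoil | handout/trefoil_full.py | notes_to_abc_chord
-- ===== SOURCE A (Python) =====
-- SCALE = ['C','D','E','F','G','A','B']
--
-- def to_abc_pitch(note, ob):
--     if ob <= 0:    return note + ',,' + ','*(-ob)
--     elif ob == 1:  return note + ','
--     elif ob == 2:  return note
--     elif ob == 3:  return note.lower()
--     elif ob == 4:  return note.lower() + "'"
--     else:          return note.lower() + "'"*(ob-3)
--
-- def notes_to_abc_chord(note_names, base_octave, trans=None):
--     if trans: note_names = [trans[n] for n in note_names]
--     abc=[]; prev_idx=-1; octave=base_octave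
--     for note in note_names:
--         idx = SCALE.index(note)
--         if prev_idx != -1 and idx < prev_idx: octave += 1
--         abc.append(to_abc_pitch(note, octave))
--         prev_idx = idx
--     return '[' + ''.join(abc) + ']' if len(abc) > 1 else abc[0]
-- ===== SOURCE B (Python) =====
-- SCALE = ['C','D','E','F','G','A','B']
--
-- def to_abc_pitch(note, ob):
--     if ob <= 0:    return note + ',,' + ','*(-ob)
--     elif ob == 1:  return note + ','
--     elif ob == 2:  return note
--     elif ob == 3:  return note.lower()
--     elif ob == 4:  return note.lower() + "'"
--     else:          return note.lower() + "'"*(ob-3)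
--
-- def notes_to_abc_chord(note_names, base_octave, trans=None):
--     if trans:
--         note_names = [trans[n] for n in note_names]
--     idxs = [SCALE.index(n) for n in note_names]
--     flags = [1 if b < a else 0 for a, b in zip(idxs, idxs[1:])]
--     octaves = [base_octave + sum(flags[:k]) for k in range(len(idxs))]
--     abc = [to_abc_pitch(n, o) for n, o in zip(note_names, octaves)]
--     return '[' + ''.join(abc) + ']' if len(abc) > 1 else abc[0]
-- ===== Notes on version B (the rewrite author's own statement) =====
-- stated objective: alternative
-- what changed: Replaces the single mutable loop carrying (abc, prev_idx, octave) by a pipeline: map notes to scale indices, compute descent flags from consecutive index pairs, derive each octave as base plus a prefix sum of flags, then zip-and-map to abc fragments.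
import Mathlib
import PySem

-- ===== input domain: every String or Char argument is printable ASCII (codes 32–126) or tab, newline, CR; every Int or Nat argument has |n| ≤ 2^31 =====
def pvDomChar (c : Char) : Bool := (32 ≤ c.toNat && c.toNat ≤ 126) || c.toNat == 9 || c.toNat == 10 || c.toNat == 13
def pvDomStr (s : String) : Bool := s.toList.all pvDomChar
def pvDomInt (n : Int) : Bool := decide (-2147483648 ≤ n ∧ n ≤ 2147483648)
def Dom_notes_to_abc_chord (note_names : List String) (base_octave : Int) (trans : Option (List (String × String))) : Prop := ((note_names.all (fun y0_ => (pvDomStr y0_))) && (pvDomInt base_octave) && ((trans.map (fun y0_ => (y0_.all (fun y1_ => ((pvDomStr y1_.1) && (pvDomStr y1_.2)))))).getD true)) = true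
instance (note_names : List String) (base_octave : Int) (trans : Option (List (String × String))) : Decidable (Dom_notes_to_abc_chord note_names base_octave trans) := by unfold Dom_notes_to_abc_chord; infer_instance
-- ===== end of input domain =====

-- B replaces A's mutable (abc, prev_idx, octave) loop by a pipeline: scale indices,
-- descent flags of consecutive pairs, octaves as prefix sums, then zip-and-map; same values.


-- ===== PORT A =====
def SCALE : List String := ["C", "D", "E", "F", "G", "A", "B"]

def to_abc_pitch (note : String) (ob : Int) : String :=
  if ob ≤ 0 then note ++ ",," ++ String.mk (PySem.List.pyRepeat [','] (-ob))
  else if ob = 1 then note ++ ","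
  else if ob = 2 then note
  else if ob = 3 then PySem.Str.lower note
  else if ob = 4 then PySem.Str.lower note ++ "'"
  else PySem.Str.lower note ++ String.mk (PySem.List.pyRepeat ['\''] (ob - 3))

-- trans is truthy iff it is a non-empty dict; trans[n] via Dict.get? (getD "" is unreachable under Pre_)
def pvEffNotes (note_names : List String) (trans : Option (List (String × String))) : List String :=
  match trans with
  | some d => if d ≠ [] then note_names.map (fun n => ((PySem.Dict.ofList d).get? n).getD "") else note_names
  | none => note_names

-- the body of A's for-loop over the state (abc, prev_idx, octave)
def pvStepA (st : List String × Int × Int) (note : String) : List String × Int × Int :=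
  let idx : Int := ((PySem.List.index? SCALE note).getD 0 : Nat)
  let octave : Int := if st.2.1 ≠ -1 ∧ idx < st.2.1 then st.2.2 + 1 else st.2.2
  (st.1 ++ [to_abc_pitch note octave], idx, octave)

def notes_to_abc_chord (note_names : List String) (base_octave : Int) (trans : Option (List (String × String))) : String :=
  let names := pvEffNotes note_names trans
  let r := names.foldl pvStepA ([], -1, base_octave)
  if 1 < r.1.length then "[" ++ PySem.Str.join "" r.1 ++ "]"
  else (PySem.List.pyGet? r.1 0).getD ""
-- ===== PORT B =====
def notes_to_abc_chord_alt (note_names : List String) (base_octave : Int) (trans : Option (List (String × String))) : String :=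
  let names := pvEffNotes note_names trans
  let idxs : List Int := names.map (fun n => (((PySem.List.index? SCALE n).getD 0 : Nat) : Int))
  let flags : List Int := (idxs.zip idxs.tail).map (fun p => if p.2 < p.1 then 1 else 0)
  let octaves : List Int := (List.range idxs.length).map (fun k => base_octave + ((flags.take k).sum))
  let abc := (names.zip octaves).map (fun p => to_abc_pitch p.1 p.2)
  if 1 < abc.length then "[" ++ PySem.Str.join "" abc ++ "]"
  else (PySem.List.pyGet? abc 0).getD ""

-- ===== PRECONDITION & SPEC =====
-- Pre_ excludes exactly the inputs where the Python A raises: empty note_names (IndexError from abc[0]),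
-- a note missing from a truthy trans (KeyError), or an effective note not in SCALE (ValueError from SCALE.index).
def Pre_notes_to_abc_chord (note_names : List String) (base_octave : Int) (trans : Option (List (String × String))) : Prop :=
  note_names ≠ [] ∧
  (match trans with
   | some d =>
       if d ≠ [] then
         ∀ n ∈ note_names, ((PySem.Dict.ofList d).get? n).isSome = true ∧
           (((PySem.Dict.ofList d).get? n).getD "") ∈ SCALE
       else ∀ n ∈ note_names, n ∈ SCALE
   | none => ∀ n ∈ note_names, n ∈ SCALE)
instance (note_names : List String) (base_octave : Int) (trans : Option (List (String × String))) : Decidable (Pre_notes_to_abc_chord note_names base_octave trans) := by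
  unfold Pre_notes_to_abc_chord
  rcases trans with _ | d
  · infer_instance
  · simp only
    infer_instance

def pvWitness_notes_to_abc_chord : List String × Int × (Option (List (String × String))) :=
  (["C", "E", "G"], 2, none)

def Spec_notes_to_abc_chord (note_names : List String) (base_octave : Int) (trans : Option (List (String × String))) (out : String) : Prop := out = notes_to_abc_chord_alt note_names base_octave trans
instance (note_names : List String) (base_octave : Int) (trans : Option (List (String × String))) (out : String) : Decidable (Spec_notes_to_abc_chord note_names base_octave trans out) := by unfold Spec_notes_to_abc_chord; infer_instance

-- ===== CLAIM (what is proved, stated in full; the proofs are below) =====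
def Claim_equal_notes_to_abc_chord : Prop := ∀ (note_names : List String) (base_octave : Int) (trans : Option (List (String × String))), Dom_notes_to_abc_chord note_names base_octave trans → Pre_notes_to_abc_chord note_names base_octave trans → Spec_notes_to_abc_chord note_names base_octave trans (notes_to_abc_chord note_names base_octave trans)

-- ===== LEMMAS AND PROOFS =====

-- scale index of a note, as both ports compute it
def pvIdx (n : String) : Int := ((PySem.List.index? SCALE n).getD 0 : Nat)

-- reference sequence of abc fragments after the first note: prev index and current octave explicit
def pvChain : Int → Int → List String → List String
  | _, _, [] => []
  | prev, oct, n :: rest =>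
      let oct' : Int := if pvIdx n < prev then oct + 1 else oct
      to_abc_pitch n oct' :: pvChain (pvIdx n) oct' rest

theorem pvIdx_nonneg (n : String) : 0 ≤ pvIdx n := Int.natCast_nonneg _

theorem pvStepA_of_nonneg (acc : List String) (prev oct : Int) (hprev : 0 ≤ prev) (n : String) :
    pvStepA (acc, prev, oct) n
      = (acc ++ [to_abc_pitch n (if pvIdx n < prev then oct + 1 else oct)], pvIdx n,
          if pvIdx n < prev then oct + 1 else oct) := by
  have hne : prev ≠ -1 := by omega
  simp only [pvStepA, pvIdx]
  simp [hne]
  split_ifs <;> rfl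

-- A's loop, once started, produces pvChain
theorem pvLoopA_eq_chain (l : List String) (acc : List String) (prev oct : Int) (hprev : 0 ≤ prev) :
    (l.foldl pvStepA (acc, prev, oct)).1 = acc ++ pvChain prev oct l := by
  induction l generalizing acc prev oct with
  | nil => simp [pvChain]
  | cons n rest ih =>
      rw [List.foldl_cons, pvStepA_of_nonneg acc prev oct hprev n,
        ih _ _ _ (pvIdx_nonneg n), pvChain]
      simp

-- B's flags of (n :: rest) are the consecutive-descent flags of rest against prev = pvIdx n
def pvFlags : Int → List String → List Int
  | _, [] => []
  | prev, n :: rest => (if pvIdx n < prev then 1 else 0) :: pvFlags (pvIdx n) rest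

theorem pvFlags_eq (l : List String) (n : String) :
    (((n :: l).map pvIdx).zip (((n :: l).map pvIdx).tail)).map
        (fun p => if p.2 < p.1 then (1 : Int) else 0)
      = pvFlags (pvIdx n) l := by
  induction l generalizing n with
  | nil => simp [pvFlags]
  | cons m rest ih =>
      simp only [List.map_cons, List.tail_cons, List.zip_cons_cons, List.map_cons] at *
      rw [pvFlags]
      exact congrArg _ (ih m)

-- B's zip-with-prefix-sum-octaves computation produces pvChain
theorem pvB_eq_chain (l : List String) (prev oct : Int) :
    (l.zip ((List.range l.length).map (fun k => oct + ((pvFlags prev l).take (k + 1)).sum))).map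
        (fun p => to_abc_pitch p.1 p.2)
      = pvChain prev oct l := by
  induction l generalizing prev oct with
  | nil => simp [pvChain]
  | cons n rest ih =>
      have hmap : ∀ (c : Int) (fl : List Int),
          (List.range rest.length).map ((fun k => oct + (c + ((List.take k fl).sum))) ∘ Nat.succ)
            = (List.range rest.length).map (fun k => (oct + c) + ((List.take (k + 1) fl)).sum) := by
        intro c fl
        refine List.map_congr_left (fun k _ => ?_)
        simp only [Function.comp_apply]
        ring
      rw [pvChain]
      simp only [List.length_cons, List.range_succ_eq_map, List.map_cons, List.map_map,
        List.zip_cons_cons, List.map_cons, pvFlags, List.take_succ_cons, List.sum_cons,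
        List.take_zero, List.sum_nil, add_zero]
      by_cases h : pvIdx n < prev
      · simp only [h, if_true]
        rw [hmap 1 (pvFlags (pvIdx n) rest)]
        rw [ih (pvIdx n) (oct + 1)]
      · simp only [h, if_false]
        rw [hmap 0 (pvFlags (pvIdx n) rest)]
        rw [add_zero, ih (pvIdx n) oct]

-- both ports' fragment lists agree on every effective note list
theorem pvAbc_eq (names : List String) (base : Int) :
    (names.foldl pvStepA ([], -1, base)).1
      = ((names.zip ((List.range (names.map (fun n => (((PySem.List.index? SCALE n).getD 0 : Nat) : Int))).length).map
            (fun k => base + ((((names.map (fun n => (((PySem.List.index? SCALE n).getD 0 : Nat) : Int))).zip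
                ((names.map (fun n => (((PySem.List.index? SCALE n).getD 0 : Nat) : Int))).tail)).map
              (fun p => if p.2 < p.1 then (1 : Int) else 0)).take k).sum))).map
          (fun p => to_abc_pitch p.1 p.2)) := by
  cases names with
  | nil => simp
  | cons n rest =>
      have hidx : (fun n => (((PySem.List.index? SCALE n).getD 0 : Nat) : Int)) = pvIdx :=
        funext (fun m => rfl)
      rw [List.foldl_cons]
      rw [show pvStepA ([], -1, base) n = ([to_abc_pitch n base], pvIdx n, base) by
        simp [pvStepA, pvIdx]]
      rw [pvLoopA_eq_chain rest [to_abc_pitch n base] _ base (pvIdx_nonneg n)]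
      rw [hidx, pvFlags_eq rest n]
      rw [List.length_map, List.length_cons, List.range_succ_eq_map]
      simp only [List.map_cons, List.take_zero, List.sum_nil, add_zero, List.zip_cons_cons,
        List.map_cons, List.map_map]
      rw [show ((fun k => base + (List.take k (pvFlags (pvIdx n) rest)).sum) ∘ Nat.succ)
            = (fun k => base + (List.take (k + 1) (pvFlags (pvIdx n) rest)).sum) from
          funext (fun k => rfl)]
      rw [pvB_eq_chain rest (pvIdx n) base, List.singleton_append]

-- ===== VERDICT (by name: the statement is the Claim_ definition above) =====
theorem notes_to_abc_chord_spec : Claim_equal_notes_to_abc_chord := by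
  intro note_names base_octave trans _ _
  unfold Spec_notes_to_abc_chord
  simp only [notes_to_abc_chord, notes_to_abc_chord_alt]
  rw [pvAbc_eq (pvEffNotes note_names trans) base_octave]
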